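-- pv_equiv track=rewrite | github.com/unfoldingWord-dev/tn_add_scripture_links | add_scripture_links.py | extract_chapter_verse_pairs
-- ===== SOURCE A (Python) =====
-- def extract_chapter_verse_pairs(reference_string, starting_chapter=None):
--     results = []
--     current_chapter = starting_chapter
--     split_refs = [ref.strip() for ref in reference_string.split(';')]
--     for ref in split_refs:
--         parts = [r.strip() for r in ref.split(',')]
--         for part in parts:
--             if ':' in part:
--                 chapter, verse = part.split(':', 1)
--                 chapter = chapter.strip()
--                 verse = verse.strip()
--                 if chapter and verse:
--                     current_chapter = chapter
--                     results.append((current_chapter, verse))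
--             elif current_chapter and part:
--                 results.append((current_chapter, part))
--     return results
-- ===== SOURCE B (Python) =====
-- def _tokens(s):
--     # Character-level scanner: one pass over the string with an explicit buffer,
--     # flushing a token at every ';' or ',' (no library split calls).
--     toks, buf = [], []
--     for ch in s:
--         if ch in ';,':
--             toks.append(''.join(buf))
--             buf = []
--         else:
--             buf.append(ch)
--     toks.append(''.join(buf))
--     return toks
--
--
-- def _parse(token):
--     # Stage 1: parse one token in isolation, with no running state.
--     # -> (chapter, verse) for a valid 'c:v' token, (None, part) for a bare
--     #    verse/range, or None for a token that contributes nothing.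
--     part = token.strip()
--     if ':' in part:
--         chapter, verse = part.split(':', 1)
--         chapter = chapter.strip()
--         verse = verse.strip()
--         return (chapter, verse) if chapter and verse else None
--     return (None, part) if part else None
--
--
-- def extract_chapter_verse_pairs(reference_string, starting_chapter=None):
--     # Stage 2: fold over the independently parsed items, propagating the
--     # last seen chapter into the bare-verse items.
--     results = []
--     chapter = starting_chapter
--     for item in map(_parse, _tokens(reference_string)):
--         if item is None:
--             continue
--         if item[0] is not None:
--             chapter = item[0]
--             results.append(item)
--         elif chapter:
--             results.append((chapter, item[1]))
--     return results
-- ===== Notes on version B (the rewrite author's own statement) =====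
-- stated objective: alternative
-- what changed: B is a staged pipeline: a character-level scanner with an explicit buffer tokenizes the string in one pass (no nested split loops), each token is then parsed in isolation into a stateless item (chapter-verse pair, bare verse, or nothing), and a final fold propagates the current chapter into the bare-verse items; A instead interleaves splitting, parsing and chapter state in two nested loops.
import Mathlib
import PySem

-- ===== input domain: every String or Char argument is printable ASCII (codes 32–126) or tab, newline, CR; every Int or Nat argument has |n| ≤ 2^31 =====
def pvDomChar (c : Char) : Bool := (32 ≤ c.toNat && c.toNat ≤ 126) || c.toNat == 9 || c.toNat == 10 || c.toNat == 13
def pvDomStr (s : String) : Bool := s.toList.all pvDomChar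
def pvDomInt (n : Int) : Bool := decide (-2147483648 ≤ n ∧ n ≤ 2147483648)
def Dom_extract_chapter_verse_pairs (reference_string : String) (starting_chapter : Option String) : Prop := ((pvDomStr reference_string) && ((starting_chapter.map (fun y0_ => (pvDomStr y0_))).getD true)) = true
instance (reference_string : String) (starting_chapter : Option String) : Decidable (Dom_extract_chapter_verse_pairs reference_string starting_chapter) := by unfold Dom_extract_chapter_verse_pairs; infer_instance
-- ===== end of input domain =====

-- B is a staged pipeline (character-level tokenizer, stateless per-token parse,
-- then a chapter-propagation fold) instead of A's nested split loops: objective 'alternative'.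

-- ===== PORT A =====
-- inner loop body of A ('for part in parts: …')
def pvAInner (st : Option String × List (String × String)) (part : String) :
    Option String × List (String × String) :=
  if PySem.Str.isIn ":" part then
    -- 'chapter, verse = part.split(':', 1)' (the list always has exactly two pieces here)
    let pieces := (PySem.Str.splitMax? part ":" 1).getD []
    let chapter := PySem.Str.strip (pieces.getD 0 "")
    let verse := PySem.Str.strip (pieces.getD 1 "")
    if chapter ≠ "" ∧ verse ≠ "" then (some chapter, st.2 ++ [(chapter, verse)]) else st
  else
    if st.1.getD "" ≠ "" ∧ part ≠ "" then (st.1, st.2 ++ [(st.1.getD "", part)]) else st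

def extract_chapter_verse_pairs (reference_string : String) (starting_chapter : Option String) :
    List (String × String) :=
  let split_refs := ((PySem.Str.split? reference_string ";").getD []).map PySem.Str.strip
  (split_refs.foldl
    (fun st ref =>
      let parts := ((PySem.Str.split? ref ",").getD []).map PySem.Str.strip
      parts.foldl pvAInner st)
    (starting_chapter, [])).2

-- ===== PORT B =====
-- '_tokens': one character-level pass with an explicit buffer, flushing at ';' and ','
def pvTokens (s : String) : List String :=
  let st := s.toList.foldl
    (fun (st : List String × List Char) ch =>
      if ch = ';' ∨ ch = ',' then (st.1 ++ [String.ofList st.2], ([] : List Char))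
      else (st.1, st.2 ++ [ch]))
    ([], [])
  st.1 ++ [String.ofList st.2]

-- '_parse': one token parsed in isolation; 'some (some c, v)' = valid 'c:v' token,
-- 'some (none, p)' = bare verse token, 'none' = contributes nothing
def pvParse (token : String) : Option (Option String × String) :=
  let part := PySem.Str.strip token
  if PySem.Str.isIn ":" part then
    let pieces := (PySem.Str.splitMax? part ":" 1).getD []
    let chapter := PySem.Str.strip (pieces.getD 0 "")
    let verse := PySem.Str.strip (pieces.getD 1 "")
    if chapter ≠ "" ∧ verse ≠ "" then some (some chapter, verse) else none
  else if part ≠ "" then some (none, part) else none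

-- stage-2 loop body ('for item in map(_parse, _tokens(...)): …')
def pvBStep2 (st : Option String × List (String × String))
    (item : Option (Option String × String)) : Option String × List (String × String) :=
  match item with
  | none => st
  | some (some ch, v) => (some ch, st.2 ++ [(ch, v)])
  | some (none, p) =>
      if st.1.getD "" ≠ "" then (st.1, st.2 ++ [(st.1.getD "", p)]) else st

def extract_chapter_verse_pairs_alt (reference_string : String) (starting_chapter : Option String) :
    List (String × String) :=
  (((pvTokens reference_string).map pvParse).foldl pvBStep2 (starting_chapter, [])).2

-- ===== PRECONDITION & SPEC =====
def Spec_extract_chapter_verse_pairs (reference_string : String) (starting_chapter : Option String) (out : List (String × String)) : Prop := out = extract_chapter_verse_pairs_alt reference_string starting_chapter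
instance (reference_string : String) (starting_chapter : Option String) (out : List (String × String)) : Decidable (Spec_extract_chapter_verse_pairs reference_string starting_chapter out) := by unfold Spec_extract_chapter_verse_pairs; infer_instance

-- ===== CLAIM (what is proved, stated in full; the proofs are below) =====
def Claim_equal_extract_chapter_verse_pairs : Prop := ∀ (reference_string : String) (starting_chapter : Option String), Dom_extract_chapter_verse_pairs reference_string starting_chapter → Spec_extract_chapter_verse_pairs reference_string starting_chapter (extract_chapter_verse_pairs reference_string starting_chapter)

-- ===== LEMMAS AND PROOFS =====

-- ---- small list combinators used by the characterisations ----

/-- Prepend `p` to the first block of a block list. -/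
def pvConsHead (p : List Char) : List (List Char) → List (List Char)
  | [] => [p]
  | x :: xs => (p ++ x) :: xs

/-- Apply `f` to the first block. -/
def pvMapHead (f : List Char → List Char) : List (List Char) → List (List Char)
  | [] => []
  | x :: xs => f x :: xs

/-- Apply `f` to the last block. -/
def pvMapLast (f : List Char → List Char) : List (List Char) → List (List Char)
  | [] => []
  | [x] => [f x]
  | x :: y :: xs => x :: pvMapLast f (y :: xs)

/-- Clean structural split on one character. -/
def pvSplitCh (c : Char) : List Char → List (List Char)
  | [] => [[]]
  | a :: t => if a = c then [] :: pvSplitCh c t else pvConsHead [a] (pvSplitCh c t)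

/-- Structural split on both delimiters at once (what B's scanner computes). -/
def pvSplit2 : List Char → List (List Char)
  | [] => [[]]
  | a :: t => if a = ';' ∨ a = ',' then [] :: pvSplit2 t else pvConsHead [a] (pvSplit2 t)

/-- Drop trailing elements satisfying `p` (`rstrip`). -/
def pvRdrop (p : Char → Bool) (l : List Char) : List Char :=
  (l.reverse.dropWhile p).reverse

theorem pvSplitCh_ne_nil (c : Char) (l : List Char) : pvSplitCh c l ≠ [] := by
  induction l with
  | nil => simp [pvSplitCh]
  | cons a t ih =>
    simp only [pvSplitCh]
    split
    · simp
    · cases h : pvSplitCh c t with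
      | nil => exact absurd h ih
      | cons x xs => simp [pvConsHead]

theorem pvSplit2_ne_nil (l : List Char) : pvSplit2 l ≠ [] := by
  induction l with
  | nil => simp [pvSplit2]
  | cons a t ih =>
    simp only [pvSplit2]
    split
    · simp
    · cases h : pvSplit2 t with
      | nil => exact absurd h ih
      | cons x xs => simp [pvConsHead]

theorem pvSplitCh_cons_self (c : Char) (t : List Char) :
    pvSplitCh c (c :: t) = [] :: pvSplitCh c t := by
  simp [pvSplitCh]

theorem pvSplitCh_cons_ne (c a : Char) (t : List Char) (h : ¬ a = c) :
    pvSplitCh c (a :: t) = pvConsHead [a] (pvSplitCh c t) := by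
  simp [pvSplitCh, h]

theorem pvConsHead_consHead (p q : List Char) (xs : List (List Char)) :
    pvConsHead p (pvConsHead q xs) = pvConsHead (p ++ q) xs := by
  cases xs <;> simp [pvConsHead]

theorem pvConsHead_append (p : List Char) (xs ys : List (List Char)) (h : xs ≠ []) :
    pvConsHead p (xs ++ ys) = pvConsHead p xs ++ ys := by
  cases xs with
  | nil => exact absurd rfl h
  | cons x xs => simp [pvConsHead]

theorem pvConsHead_nil (xs : List (List Char)) (h : xs ≠ []) : pvConsHead [] xs = xs := by
  cases xs with
  | nil => exact absurd rfl h
  | cons x t => simp [pvConsHead]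

-- ---- characterising the PySem split on a single-character separator ----

theorem pvSplitOn_go_eq (c : Char) (fuel : Nat) (l cur : List Char) (acc : List (List Char))
    (h : l.length < fuel) :
    PySem.Chars.splitOn.go [c] fuel l cur acc =
      acc.reverse ++ pvConsHead cur.reverse (pvSplitCh c l) := by
  induction fuel generalizing l cur acc with
  | zero => omega
  | succ f ih =>
    cases l with
    | nil =>
      rw [PySem.Chars.splitOn.go.eq_def]
      simp [pvSplitCh, pvConsHead]
    | cons a t =>
      rw [PySem.Chars.splitOn.go.eq_def]
      simp only [List.isPrefixOf, Bool.and_true]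
      by_cases hac : c = a
      · subst hac
        simp only [beq_self_eq_true, if_true, List.length_cons, List.length_nil,
          List.drop_succ_cons, List.drop_zero, Nat.zero_add]
        rw [ih t [] (cur.reverse :: acc) (by simpa using Nat.lt_of_succ_lt_succ h)]
        rw [show ([] : List Char).reverse = [] from rfl,
          pvConsHead_nil _ (pvSplitCh_ne_nil c t)]
        simp [pvSplitCh, pvConsHead]
      · have : (c == a) = false := by simp [hac]
        rw [this]
        simp only [if_false, Bool.false_eq_true]
        rw [ih t (a :: cur) acc (by simpa using Nat.lt_of_succ_lt_succ h)]
        simp only [pvSplitCh, List.reverse_cons]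
        rw [if_neg (fun hh => hac hh.symm), pvConsHead_consHead]

theorem pvSplitOn_single (c : Char) (l : List Char) :
    PySem.Chars.splitOn l [c] = pvSplitCh c l := by
  unfold PySem.Chars.splitOn
  rw [pvSplitOn_go_eq c (l.length + 1) l [] [] (by omega)]
  simp [pvConsHead_nil _ (pvSplitCh_ne_nil c l)]

-- ---- B's scanner computes the two-delimiter split ----

theorem pvTokens_go (l : List Char) (toks : List String) (buf : List Char) :
    (let st := l.foldl
        (fun (st : List String × List Char) ch =>
          if ch = ';' ∨ ch = ',' then (st.1 ++ [String.ofList st.2], ([] : List Char))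
          else (st.1, st.2 ++ [ch]))
        (toks, buf)
     st.1 ++ [String.ofList st.2]) =
      toks ++ (pvConsHead buf (pvSplit2 l)).map String.ofList := by
  induction l generalizing toks buf with
  | nil => simp [pvSplit2, pvConsHead]
  | cons a t ih =>
    by_cases h : a = ';' ∨ a = ','
    · simp only [List.foldl_cons, if_pos h]
      rw [ih]
      simp only [pvSplit2, if_pos h]
      rw [pvConsHead_nil _ (pvSplit2_ne_nil t)]
      cases hS : pvSplit2 t with
      | nil => exact absurd hS (pvSplit2_ne_nil t)
      | cons x xs => simp [pvConsHead]
    · simp only [List.foldl_cons, if_neg h]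
      rw [ih]
      simp only [pvSplit2, if_neg h]
      rw [pvConsHead_consHead]

theorem pvSplit2_eq (l : List Char) :
    pvSplit2 l = pvSplitCh ',' (l.map (fun x => if x = ';' then ',' else x)) := by
  induction l with
  | nil => simp [pvSplit2, pvSplitCh]
  | cons a t ih =>
    by_cases h : a = ';' ∨ a = ','
    · have hm : (if a = ';' then ',' else a) = ',' := by
        rcases h with h | h <;> simp [h]
      rw [show pvSplit2 (a :: t) = [] :: pvSplit2 t from by simp [pvSplit2, h],
        List.map_cons, hm, pvSplitCh_cons_self, ih]
    · push Not at h
      rw [show pvSplit2 (a :: t) = pvConsHead [a] (pvSplit2 t) from by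
          simp [pvSplit2, h.1, h.2],
        List.map_cons, if_neg h.1, pvSplitCh_cons_ne ',' a _ h.2, ih]

theorem pvTokens_eq (s : String) :
    pvTokens s =
      (pvSplitCh ',' (s.toList.map (fun x => if x = ';' then ',' else x))).map
        String.ofList := by
  unfold pvTokens
  rw [pvTokens_go s.toList [] []]
  rw [pvConsHead_nil _ (pvSplit2_ne_nil s.toList), pvSplit2_eq]
  simp

-- ---- split/strip interaction ----

theorem pvSplitCh_of_not_mem (c : Char) (l : List Char) (h : c ∉ l) :
    pvSplitCh c l = [l] := by
  induction l with
  | nil => simp [pvSplitCh]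
  | cons a t ih =>
    simp only [List.mem_cons, not_or] at h
    simp only [pvSplitCh, if_neg (fun hh : a = c => h.1 hh.symm)]
    rw [ih h.2]
    simp [pvConsHead]

theorem pvSplitCh_map_swap (c d : Char) (hcd : c ≠ d) (l : List Char) :
    pvSplitCh c (l.map (fun x => if x = d then c else x)) =
      (pvSplitCh d l).flatMap (pvSplitCh c) := by
  induction l with
  | nil => simp [pvSplitCh]
  | cons a t ih =>
    simp only [List.map_cons]
    obtain ⟨x, xs, hS⟩ : ∃ x xs, pvSplitCh d t = x :: xs := by
      cases hS : pvSplitCh d t with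
      | nil => exact absurd hS (pvSplitCh_ne_nil d t)
      | cons x xs => exact ⟨x, xs, rfl⟩
    by_cases had : a = d
    · subst had
      rw [if_pos rfl, pvSplitCh_cons_self, pvSplitCh_cons_self, List.flatMap_cons, ih]
      simp [pvSplitCh]
    · rw [if_neg had, pvSplitCh_cons_ne d a t had]
      by_cases hac : a = c
      · subst hac
        rw [pvSplitCh_cons_self, ih, hS, pvConsHead, List.flatMap_cons,
          List.singleton_append, List.flatMap_cons, pvSplitCh_cons_self]
        simp
      · rw [pvSplitCh_cons_ne c a _ hac, ih, hS, pvConsHead, List.flatMap_cons,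
          List.singleton_append, List.flatMap_cons, pvSplitCh_cons_ne c a x hac,
          pvConsHead_append [a] (pvSplitCh c x) (xs.flatMap (pvSplitCh c))
            (pvSplitCh_ne_nil c x)]

theorem pvSplitCh_dropWhile (c : Char) (p : Char → Bool) (hc : p c = false) (l : List Char) :
    pvSplitCh c (l.dropWhile p) = pvMapHead (List.dropWhile p) (pvSplitCh c l) := by
  induction l with
  | nil => simp [pvSplitCh, pvMapHead]
  | cons a t ih =>
    obtain ⟨x, xs, hS⟩ : ∃ x xs, pvSplitCh c t = x :: xs := by
      cases hS : pvSplitCh c t with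
      | nil => exact absurd hS (pvSplitCh_ne_nil c t)
      | cons x xs => exact ⟨x, xs, rfl⟩
    by_cases hpa : p a = true
    · have hac : ¬ a = c := fun hh => by rw [hh, hc] at hpa; exact absurd hpa (by simp)
      rw [List.dropWhile_cons, if_pos hpa, ih, pvSplitCh_cons_ne c a t hac, hS, pvConsHead,
        pvMapHead, pvMapHead, List.singleton_append, List.dropWhile_cons, if_pos hpa]
    · rw [List.dropWhile_cons, if_neg hpa]
      by_cases hac : a = c
      · subst hac
        rw [pvSplitCh_cons_self]
        simp [pvMapHead]
      · rw [pvSplitCh_cons_ne c a t hac, hS]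
        simp [pvConsHead, pvMapHead, hpa]

theorem pvRdrop_cons (p : Char → Bool) (a : Char) (t : List Char) :
    pvRdrop p (a :: t) =
      if pvRdrop p t = [] then (if p a then [] else [a]) else a :: pvRdrop p t := by
  unfold pvRdrop
  simp only [List.reverse_cons]
  rw [List.dropWhile_append]
  by_cases hz : List.dropWhile p t.reverse = []
  · rw [if_pos (by simp [hz]), hz]
    simp only [List.reverse_nil]
    by_cases hpa : p a = true
    · simp [hpa]
    · simp [hpa]
  · rw [if_neg (by simp [hz])]
    rw [if_neg (by simp [hz])]
    simp

theorem pvRdrop_eq_nil_iff (p : Char → Bool) (l : List Char) :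
    pvRdrop p l = [] ↔ l.all p := by
  unfold pvRdrop
  simp [List.dropWhile_eq_nil_iff, List.all_eq_true]

theorem pvSplitCh_eq_nilnil (c : Char) (z : List Char) (h : pvSplitCh c z = [[]]) :
    z = [] := by
  cases z with
  | nil => rfl
  | cons a t =>
    exfalso
    by_cases hac : a = c
    · subst hac
      rw [pvSplitCh_cons_self] at h
      obtain ⟨x, xs, hS⟩ : ∃ x xs, pvSplitCh a t = x :: xs := by
        cases hS : pvSplitCh a t with
        | nil => exact absurd hS (pvSplitCh_ne_nil a t)
        | cons x xs => exact ⟨x, xs, rfl⟩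
      rw [hS] at h
      simp at h
    · rw [pvSplitCh_cons_ne c a t hac] at h
      obtain ⟨x, xs, hS⟩ : ∃ x xs, pvSplitCh c t = x :: xs := by
        cases hS : pvSplitCh c t with
        | nil => exact absurd hS (pvSplitCh_ne_nil c t)
        | cons x xs => exact ⟨x, xs, rfl⟩
      rw [hS] at h
      simp [pvConsHead] at h

theorem pvSplitCh_rdrop (c : Char) (p : Char → Bool) (hc : p c = false) (l : List Char) :
    pvSplitCh c (pvRdrop p l) = pvMapLast (pvRdrop p) (pvSplitCh c l) := by
  induction l with
  | nil => simp [pvRdrop, pvSplitCh, pvMapLast]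
  | cons a t ih =>
    obtain ⟨x, xs, hS⟩ : ∃ x xs, pvSplitCh c t = x :: xs := by
      cases hS : pvSplitCh c t with
      | nil => exact absurd hS (pvSplitCh_ne_nil c t)
      | cons x xs => exact ⟨x, xs, rfl⟩
    rw [pvRdrop_cons]
    by_cases hz : pvRdrop p t = []
    · rw [if_pos hz]
      have hall : t.all p := (pvRdrop_eq_nil_iff p t).mp hz
      have hnot : c ∉ t := fun hmem => by
        have h2 := List.all_eq_true.mp hall c hmem
        rw [hc] at h2
        exact absurd h2 (by simp)
      have hSt : pvSplitCh c t = [t] := pvSplitCh_of_not_mem c t hnot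
      by_cases hpa : p a = true
      · rw [if_pos hpa]
        have hac : ¬ a = c := fun hh => by rw [hh, hc] at hpa; exact absurd hpa (by simp)
        rw [pvSplitCh_cons_ne c a t hac, hSt]
        simp only [pvSplitCh, pvConsHead, pvMapLast, List.singleton_append]
        rw [pvRdrop_cons, if_pos hz, if_pos hpa]
      · rw [if_neg hpa]
        by_cases hac : a = c
        · subst hac
          rw [pvSplitCh_cons_self, pvSplitCh_cons_self, hSt]
          simp only [pvMapLast]
          rw [hz]
          simp [pvSplitCh]
        · rw [pvSplitCh_cons_ne c a t hac, hSt]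
          simp only [pvConsHead, pvMapLast, List.singleton_append]
          rw [pvSplitCh_of_not_mem c [a]
            (by simp; exact fun hh : c = a => hac hh.symm)]
          rw [pvRdrop_cons, if_pos hz, if_neg hpa]
    · rw [if_neg hz]
      by_cases hac : a = c
      · subst hac
        rw [pvSplitCh_cons_self, ih, pvSplitCh_cons_self, hS]
        rfl
      · rw [pvSplitCh_cons_ne c a _ hac, ih, hS, pvSplitCh_cons_ne c a t hac, hS]
        cases xs with
        | nil =>
          have hx : pvRdrop p x ≠ [] := by
            intro h0
            have h1 : pvSplitCh c (pvRdrop p t) = [[]] := by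
              rw [ih, hS]
              simp [pvMapLast, h0]
            exact hz (pvSplitCh_eq_nilnil c _ h1)
          simp only [pvConsHead, pvMapLast, List.singleton_append]
          rw [pvRdrop_cons, if_neg hx]
        | cons y ys =>
          simp [pvConsHead, pvMapLast]

-- ---- strip algebra ----

theorem pvStrip_eq (l : List Char) :
    PySem.Chars.strip l = pvRdrop PySem.Chars.isspace (l.dropWhile PySem.Chars.isspace) := by
  simp [PySem.Chars.strip, PySem.Chars.lstrip, PySem.Chars.rstrip, pvRdrop]

theorem pvDropWhile_idem (p : Char → Bool) (l : List Char) :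
    List.dropWhile p (List.dropWhile p l) = List.dropWhile p l := by
  induction l with
  | nil => simp
  | cons a t ih =>
    by_cases hpa : p a = true
    · rw [List.dropWhile_cons, if_pos hpa, ih]
    · rw [List.dropWhile_cons, if_neg hpa, List.dropWhile_cons, if_neg hpa]

theorem pvRdrop_dropWhile_comm (p : Char → Bool) (l : List Char) :
    List.dropWhile p (pvRdrop p l) = pvRdrop p (List.dropWhile p l) := by
  induction l with
  | nil => simp [pvRdrop]
  | cons a t ih =>
    by_cases hpa : p a = true
    · rw [List.dropWhile_cons, if_pos hpa, pvRdrop_cons]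
      by_cases hz : pvRdrop p t = []
      · rw [if_pos hz, if_pos hpa, ← ih, hz]
      · rw [if_neg hz, List.dropWhile_cons, if_pos hpa, ih]
    · rw [List.dropWhile_cons, if_neg hpa, pvRdrop_cons]
      by_cases hz : pvRdrop p t = []
      · rw [if_pos hz, if_neg hpa, List.dropWhile_cons, if_neg hpa]
      · rw [if_neg hz, List.dropWhile_cons, if_neg hpa]

theorem pvRdrop_idem (p : Char → Bool) (l : List Char) :
    pvRdrop p (pvRdrop p l) = pvRdrop p l := by
  unfold pvRdrop
  rw [List.reverse_reverse, pvDropWhile_idem]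

theorem pvStrip_dropWhile (l : List Char) :
    PySem.Chars.strip (l.dropWhile PySem.Chars.isspace) = PySem.Chars.strip l := by
  rw [pvStrip_eq, pvStrip_eq, pvDropWhile_idem]

theorem pvStrip_rdrop (l : List Char) :
    PySem.Chars.strip (pvRdrop PySem.Chars.isspace l) = PySem.Chars.strip l := by
  rw [pvStrip_eq, pvStrip_eq, pvRdrop_dropWhile_comm, pvRdrop_idem]

theorem pvMapHead_congr (h g : List Char → List Char) (hg : ∀ x, h (g x) = h x)
    (xs : List (List Char)) : (pvMapHead g xs).map h = xs.map h := by
  cases xs with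
  | nil => rfl
  | cons x t => simp [pvMapHead, hg]

theorem pvMapLast_congr (h g : List Char → List Char) (hg : ∀ x, h (g x) = h x)
    (xs : List (List Char)) : (pvMapLast g xs).map h = xs.map h := by
  induction xs with
  | nil => rfl
  | cons x t ih =>
    cases t with
    | nil => simp [pvMapLast, hg]
    | cons y ys =>
      simp only [pvMapLast, List.map_cons]
      rw [show (pvMapLast g (y :: ys)).map h = (y :: ys).map h from ih]
      simp

/-- Stripping the outer block before the inner split does not change the stripped parts. -/
theorem pvT (c : Char) (hc : PySem.Chars.isspace c = false) (l : List Char) :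
    (pvSplitCh c (PySem.Chars.strip l)).map PySem.Chars.strip =
      (pvSplitCh c l).map PySem.Chars.strip := by
  rw [pvStrip_eq l, pvSplitCh_rdrop c _ hc, pvSplitCh_dropWhile c _ hc,
    pvMapLast_congr PySem.Chars.strip (pvRdrop PySem.Chars.isspace) pvStrip_rdrop,
    pvMapHead_congr PySem.Chars.strip (List.dropWhile PySem.Chars.isspace) pvStrip_dropWhile]

-- ---- B's staged step equals A's inner step on the stripped token ----

theorem pvParse_step (st : Option String × List (String × String)) (token : String) :
    pvBStep2 st (pvParse token) = pvAInner st (PySem.Str.strip token) := by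
  simp only [pvParse, pvAInner]
  split_ifs with h1 h2 h3 <;> simp_all [pvBStep2]

-- ---- assembly ----

theorem pvMain (reference_string : String) (starting_chapter : Option String) :
    extract_chapter_verse_pairs reference_string starting_chapter =
      extract_chapter_verse_pairs_alt reference_string starting_chapter := by
  simp only [extract_chapter_verse_pairs, extract_chapter_verse_pairs_alt]
  have hso : ∀ l : List Char,
      PySem.Str.strip (String.ofList l) = String.ofList (PySem.Chars.strip l) := by
    intro l
    rw [PySem.Str.strip.eq_1, String.toList_ofList]
  have hsplitc : ∀ (s : String) (c : Char) (sep : String), sep.toList = [c] →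
      (PySem.Str.split? s sep).getD [] = (pvSplitCh c s.toList).map String.ofList := by
    intro s c sep hsep
    unfold PySem.Str.split?
    rw [hsep, PySem.Chars.split?]
    simp only [List.isEmpty_cons, Bool.false_eq_true, if_false]
    rw [pvSplitOn_single]
    simp
  rw [hsplitc reference_string ';' ";" rfl]
  -- middle form: one fold of pvAInner over the stripped flat token list
  trans (List.foldl pvAInner (starting_chapter, ([] : List (String × String)))
      ((pvSplitCh ',' (reference_string.toList.map (fun x => if x = ';' then ',' else x))).map
        (fun l => String.ofList (PySem.Chars.strip l)))).2
  · -- A-side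
    refine congrArg Prod.snd ?_
    rw [List.map_map, List.foldl_map]
    rw [show (fun (st : Option String × List (String × String)) (P : List Char) =>
          List.foldl pvAInner st
            (((PySem.Str.split? ((PySem.Str.strip ∘ String.ofList) P) ",").getD []).map
              PySem.Str.strip)) =
        (fun st P =>
          List.foldl pvAInner st
            ((pvSplitCh ',' P).map (fun l => String.ofList (PySem.Chars.strip l)))) from ?_]
    · rw [← List.foldl_flatMap]
      rw [show (pvSplitCh ';' reference_string.toList).flatMap
            (fun P => (pvSplitCh ',' P).map (fun l => String.ofList (PySem.Chars.strip l))) =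
          ((pvSplitCh ';' reference_string.toList).flatMap (pvSplitCh ',')).map
            (fun l => String.ofList (PySem.Chars.strip l)) from List.map_flatMap.symm]
      rw [← pvSplitCh_map_swap ',' ';' (by decide) reference_string.toList]
    · funext st P
      rw [Function.comp_apply, hso, hsplitc (String.ofList (PySem.Chars.strip P)) ','
        "," rfl, String.toList_ofList, List.map_map]
      congr 1
      rw [show (PySem.Str.strip ∘ String.ofList) = (fun l => String.ofList (PySem.Chars.strip l))
        from funext hso]
      rw [show (fun l => String.ofList (PySem.Chars.strip l)) =
        (String.ofList ∘ PySem.Chars.strip) from rfl]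
      rw [← List.map_map, ← List.map_map, pvT ',' (by decide) P]
  · -- B-side: peel the map off the fold, then the scanner's token list is the flat split
    refine congrArg Prod.snd ?_
    symm
    rw [List.foldl_map,
      show (fun st tok => pvBStep2 st (pvParse tok)) =
        (fun st tok => pvAInner st (PySem.Str.strip tok)) from
      funext fun st => funext fun tok => pvParse_step st tok]
    rw [pvTokens_eq, List.foldl_map, List.foldl_map]
    rw [show (fun (st : Option String × List (String × String)) (l : List Char) =>
          pvAInner st (PySem.Str.strip (String.ofList l))) =
        (fun st l => pvAInner st (String.ofList (PySem.Chars.strip l))) from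
      funext fun st => funext fun l => by rw [hso]]

-- ===== VERDICT (by name: the statement is the Claim_ definition above) =====
theorem extract_chapter_verse_pairs_spec : Claim_equal_extract_chapter_verse_pairs := by
  intro rs sc _
  show _ = _
  exact pvMain rs sc
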